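-- pv_equiv track=rewrite | github.com/GroenhofBram/whisper-CHOREC | src/post_error_analysis.py | differ_by_other_plosive
-- ===== SOURCE A (Python) =====
-- def differ_by_other_plosive(prompt, hypothesis):
--     plosive_pairs = [("p", "b"), ("t", "d")]
--
--     # Ensure prompt and hypothesis are of the same length
--     if len(prompt) != len(hypothesis):
--         return False
--
--     # Flag to track if a mismatch other than plosive substitution is found
--     mismatch_found = False
--
--     for i in range(len(prompt)):
--         if prompt[i] != hypothesis[i]:
--             # Check if the characters are not the same, and if they are plosive pairs
--             if (prompt[i], hypothesis[i]) not in plosive_pairs and (hypothesis[i], prompt[i]) not in plosive_pairs: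
--                 mismatch_found = True
--                 break
--
--     # If no other mismatches were found and there was at least one plosive substitution
--     return not mismatch_found
-- ===== SOURCE B (Python) =====
-- def differ_by_other_plosive(prompt, hypothesis):
--     # Normalize plosive pairs to a canonical representative and compare.
--     norm = str.maketrans("pt", "bd")
--     return prompt.translate(norm) == hypothesis.translate(norm)
-- ===== Notes on version B (the rewrite author's own statement) =====
-- stated objective: simpler
-- what changed: Replaces the indexed loop with break over character positions by a translate-then-compare: both strings are normalized (p->b, t->d) and tested for equality; the length check falls out of string equality.
import Mathlib
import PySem

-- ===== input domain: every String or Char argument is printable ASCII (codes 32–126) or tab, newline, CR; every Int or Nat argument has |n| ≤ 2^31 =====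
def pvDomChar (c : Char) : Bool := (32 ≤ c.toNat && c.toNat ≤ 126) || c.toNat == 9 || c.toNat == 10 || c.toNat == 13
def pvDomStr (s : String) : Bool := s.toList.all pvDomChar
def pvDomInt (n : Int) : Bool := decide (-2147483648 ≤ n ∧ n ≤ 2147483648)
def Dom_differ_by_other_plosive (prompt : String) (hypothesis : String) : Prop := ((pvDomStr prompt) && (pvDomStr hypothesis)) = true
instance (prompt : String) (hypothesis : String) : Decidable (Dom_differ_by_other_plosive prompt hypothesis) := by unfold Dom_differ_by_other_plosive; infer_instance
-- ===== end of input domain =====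

-- B replaces A's indexed scan-with-break by normalizing p->b, t->d in both strings and comparing for equality (objective: simpler).

-- ===== PORT A =====
-- the for-loop with break: scans indices i upward, sets mismatch_found (= returns true) at the
-- first position that is neither equal nor a plosive pair; indexing is always in range so getD's
-- default is never used.
def pvALoop (p h : List Char) (i : Nat) : Bool :=
  if _ : i < p.length then
    if p.getD i ' ' ≠ h.getD i ' ' then
      if (p.getD i ' ', h.getD i ' ') ∉ [('p','b'),('t','d')] ∧
         (h.getD i ' ', p.getD i ' ') ∉ [('p','b'),('t','d')] then
        true
      else pvALoop p h (i+1)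
    else pvALoop p h (i+1)
  else false
termination_by p.length - i

def differ_by_other_plosive (prompt : String) (hypothesis : String) : Bool :=
  if prompt.toList.length ≠ hypothesis.toList.length then false
  else !(pvALoop prompt.toList hypothesis.toList 0)

-- ===== PORT B =====
-- character translation table p->b, t->d (str.maketrans/translate)
def pvNorm (c : Char) : Char := if c = 'p' then 'b' else if c = 't' then 'd' else c

def differ_by_other_plosive_alt (prompt : String) (hypothesis : String) : Bool :=
  prompt.toList.map pvNorm == hypothesis.toList.map pvNorm

-- ===== PRECONDITION & SPEC =====
def Spec_differ_by_other_plosive (prompt : String) (hypothesis : String) (out : Bool) : Prop := out = differ_by_other_plosive_alt prompt hypothesis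
instance (prompt : String) (hypothesis : String) (out : Bool) : Decidable (Spec_differ_by_other_plosive prompt hypothesis out) := by unfold Spec_differ_by_other_plosive; infer_instance

-- ===== CLAIM (what is proved, stated in full; the proofs are below) =====
def Claim_equal_differ_by_other_plosive : Prop := ∀ (prompt : String) (hypothesis : String), Dom_differ_by_other_plosive prompt hypothesis → Spec_differ_by_other_plosive prompt hypothesis (differ_by_other_plosive prompt hypothesis)

-- ===== LEMMAS AND PROOFS =====

theorem pvNorm_eq_iff (a b : Char) :
    (pvNorm a = pvNorm b) ↔
      (a = b ∨ (a = 'p' ∧ b = 'b') ∨ (a = 'b' ∧ b = 'p') ∨ (a = 't' ∧ b = 'd') ∨ (a = 'd' ∧ b = 't')) := by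
  unfold pvNorm
  split_ifs <;> simp_all [Char.ext_iff] <;> tauto

-- the loop from position i decides inequality of the normalized suffixes (given equal lengths)
theorem pvALoop_eq (p h : List Char) (hl : p.length = h.length) (i : Nat) :
    pvALoop p h i = !((p.drop i).map pvNorm == (h.drop i).map pvNorm) := by
  by_cases hi : i < p.length
  · have hih : i < h.length := hl ▸ hi
    rw [pvALoop]
    have hp : p.drop i = p[i] :: p.drop (i+1) := List.drop_eq_getElem_cons hi
    have hh : h.drop i = h[i] :: h.drop (i+1) := List.drop_eq_getElem_cons hih
    have ih := pvALoop_eq p h hl (i+1)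
    have hpg : p.getD i ' ' = p[i] := List.getD_eq_getElem p ' ' hi
    have hhg : h.getD i ' ' = h[i] := List.getD_eq_getElem h ' ' hih
    rw [hp, hh]
    simp only [hi, dif_pos, hpg, hhg, List.map_cons, List.cons_beq_cons, ih]
    by_cases hok : pvNorm p[i] = pvNorm h[i]
    · rcases (pvNorm_eq_iff _ _).mp hok with h1 | h1 | h1 | h1 | h1
      · simp [h1]
      all_goals (rw [h1.1, h1.2]; simp [pvNorm])
    · have hceq : p[i] ≠ h[i] := fun e => hok (congrArg pvNorm e)
      have hm1 : (p[i], h[i]) ∉ [('p','b'),('t','d')] := by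
        intro hm
        simp [Prod.ext_iff] at hm
        rcases hm with ⟨e1, e2⟩ | ⟨e1, e2⟩ <;> exact hok (by rw [e1, e2]; decide)
      have hm2 : (h[i], p[i]) ∉ [('p','b'),('t','d')] := by
        intro hm
        simp [Prod.ext_iff] at hm
        rcases hm with ⟨e1, e2⟩ | ⟨e1, e2⟩ <;> exact hok (by rw [e1, e2]; decide)
      rw [if_pos hceq, if_pos ⟨hm1, hm2⟩]
      have hne : (pvNorm p[i] == pvNorm h[i]) = false := by simp [hok]
      simp [hne]
  · rw [pvALoop]
    have hih : ¬ i < h.length := hl ▸ hi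
    simp [hi, List.drop_eq_nil_of_le (Nat.le_of_not_lt hi), List.drop_eq_nil_of_le (Nat.le_of_not_lt hih)]
termination_by p.length - i

-- ===== VERDICT (by name: the statement is the Claim_ definition above) =====
theorem differ_by_other_plosive_spec : Claim_equal_differ_by_other_plosive := by
  intro prompt hypothesis _
  unfold Spec_differ_by_other_plosive differ_by_other_plosive differ_by_other_plosive_alt
  by_cases hl : prompt.toList.length = hypothesis.toList.length
  · simp only [hl, ne_eq, not_true_eq_false, if_false]
    rw [pvALoop_eq _ _ hl 0]
    simp
  · simp only [ne_eq, hl, not_false_iff, if_true]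
    symm
    apply Bool.eq_false_iff.mpr
    intro hc
    have := List.length_map (f := pvNorm) (as := prompt.toList)
    have h2 : (prompt.toList.map pvNorm).length = (hypothesis.toList.map pvNorm).length := by
      rw [eq_of_beq hc]
    simp at h2
    exact hl h2
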